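-- pv_equiv track=rewrite | github.com/btrif/Python_dev_repo | Project EULER/pb202 Laserbeam.py | _get_factor_multiplies
-- ===== SOURCE A (Python) =====
-- import itertools, functools, operator
-- import itertools
--
-- def _get_factor_multiplies(factors):
--     rv = []
--     n = len(factors)
--     for i in range(1, n + 1):
--         for factor_subset in itertools.combinations(factors, i):
--             x = 1
--             for j in factor_subset:
--                 x *= j
--             rv.append([x, len(factor_subset) % 2 == 1])
--     return rv
-- ===== SOURCE B (Python) =====
-- def _get_factor_multiplies(factors):
--     # buckets[k] holds the products of all k-element subsets of the suffix
--     # processed so far, in lexicographic order of their index sets.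
--     buckets = [[1]]
--     for x in reversed(factors):
--         grown = [[1]]
--         for k in range(1, len(buckets) + 1):
--             with_x = [x * p for p in buckets[k - 1]]
--             without_x = buckets[k] if k < len(buckets) else []
--             grown.append(with_x + without_x)
--         buckets = grown
--     return [[p, k % 2 == 1] for k in range(1, len(buckets)) for p in buckets[k]]
-- ===== Notes on version B (the rewrite author's own statement) =====
-- stated objective: alternative
-- what changed: Replaces the per-size itertools.combinations enumeration with a per-subset product loop by a single right-to-left dynamic programme over size-indexed buckets that extends each subset product by one multiplication.
import Mathlib
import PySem

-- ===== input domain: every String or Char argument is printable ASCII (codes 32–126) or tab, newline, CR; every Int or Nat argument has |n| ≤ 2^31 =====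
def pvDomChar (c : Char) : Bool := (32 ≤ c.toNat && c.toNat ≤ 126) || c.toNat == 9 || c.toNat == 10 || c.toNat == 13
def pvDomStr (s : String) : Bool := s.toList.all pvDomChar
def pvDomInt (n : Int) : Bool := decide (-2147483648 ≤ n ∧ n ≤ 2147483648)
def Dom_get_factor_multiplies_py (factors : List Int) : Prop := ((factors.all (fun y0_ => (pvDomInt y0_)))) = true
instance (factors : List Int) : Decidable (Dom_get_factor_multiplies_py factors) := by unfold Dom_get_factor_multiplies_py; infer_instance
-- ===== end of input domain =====

-- B replaces A's per-size itertools.combinations + per-subset product loop by one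
-- right-to-left dynamic programme that extends every subset product once (alternative decomposition).

-- ===== PORT A =====
-- itertools.combinations(xs, k) in its emission order (lexicographic by index set)
def pvCombos : Nat → List Int → List (List Int)
  | 0, _ => [[]]
  | _ + 1, [] => []
  | k + 1, x :: xs => ((pvCombos k xs).map (fun c => x :: c)) ++ pvCombos (k + 1) xs

def get_factor_multiplies_py (factors : List Int) : List (Int × Bool) :=
  let n := factors.length
  (List.range' 1 n).foldl (fun rv i =>
    (pvCombos i factors).foldl (fun rv c =>
      rv ++ [(c.foldl (fun x j => x * j) 1, decide (c.length % 2 = 1))]) rv) []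

-- ===== PORT B =====
-- one step of Source B's loop body: prepend element x to the suffix DP table
def pvGrow (x : Int) (buckets : List (List Int)) : List (List Int) :=
  [([1] : List Int)] ++ (List.range' 1 buckets.length).map (fun k =>
    ((buckets.getD (k - 1) []).map (fun p => x * p)) ++
      (if k < buckets.length then buckets.getD k [] else []))

def get_factor_multiplies_py_alt (factors : List Int) : List (Int × Bool) :=
  let buckets := factors.reverse.foldl (fun bk x => pvGrow x bk) [[1]]
  (List.range' 1 (buckets.length - 1)).flatMap (fun k =>
    (buckets.getD k []).map (fun p => (p, decide (k % 2 = 1))))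

-- ===== PRECONDITION & SPEC =====
def Spec_get_factor_multiplies_py (factors : List Int) (out : List (Int × Bool)) : Prop := out = get_factor_multiplies_py_alt factors
instance (factors : List Int) (out : List (Int × Bool)) : Decidable (Spec_get_factor_multiplies_py factors out) := by unfold Spec_get_factor_multiplies_py; infer_instance

-- ===== CLAIM (what is proved, stated in full; the proofs are below) =====
def Claim_equal_get_factor_multiplies_py : Prop := ∀ (factors : List Int), Dom_get_factor_multiplies_py factors → Spec_get_factor_multiplies_py factors (get_factor_multiplies_py factors)

-- ===== LEMMAS AND PROOFS =====

lemma pvCombos_nil_of_lt : ∀ (xs : List Int) (k : Nat), xs.length < k → pvCombos k xs = [] := by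
  intro xs
  induction xs with
  | nil => intro k hk; cases k with
    | zero => omega
    | succ k => rfl
  | cons x xs ih =>
    intro k hk
    cases k with
    | zero => omega
    | succ k =>
      simp only [pvCombos, ih k (by simpa using hk), ih (k + 1) (by simp at hk ⊢; omega)]
      simp

lemma pvCombos_mem_length : ∀ (xs : List Int) (k : Nat) (c : List Int), c ∈ pvCombos k xs → c.length = k := by
  intro xs
  induction xs with
  | nil => intro k c hc; cases k with
    | zero => simp [pvCombos] at hc; simp [hc]
    | succ k => simp [pvCombos] at hc
  | cons x xs ih =>
    intro k c hc
    cases k with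
    | zero => simp [pvCombos] at hc; simp [hc]
    | succ k =>
      simp only [pvCombos, List.mem_append, List.mem_map] at hc
      rcases hc with ⟨d, hd, rfl⟩ | hc
      · simp [ih k d hd]
      · exact ih _ _ hc

lemma foldl_mul_eq_prod (c : List Int) (a : Int) : c.foldl (fun x j => x * j) a = a * c.prod := by
  induction c generalizing a with
  | nil => simp
  | cons y ys ih => simp [List.foldl_cons, ih, List.prod_cons, mul_assoc]

lemma foldl_append_singleton {α β : Type} (l : List α) (g : α → β) (a : List β) :
    l.foldl (fun acc c => acc ++ [g c]) a = a ++ l.map g := by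
  induction l generalizing a with
  | nil => simp
  | cons x xs ih => simp [ih]

lemma foldl_append_acc {α β : Type} (l : List α) (h : α → List β) (a : List β) :
    l.foldl (fun acc i => acc ++ h i) a = a ++ l.flatMap h := by
  induction l generalizing a with
  | nil => simp
  | cons x xs ih => simp [ih]

lemma getD_map_range {β : Type} (n j : Nat) (f : Nat → β) (d : β) (hj : j < n) :
    ((List.range n).map f).getD j d = f j := by
  rw [List.getD_eq_getElem?_getD]
  simp [hj]

-- the DP invariant: after folding the whole list, bucket k is the list of
-- products of the k-element combinations, in combination order
lemma foldr_pvGrow (xs : List Int) :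
    xs.foldr (fun x bk => pvGrow x bk) [[1]] =
      (List.range (xs.length + 1)).map (fun k => (pvCombos k xs).map List.prod) := by
  induction xs with
  | nil => simp [pvCombos]
  | cons x xs ih =>
    simp only [List.foldr_cons, ih]
    unfold pvGrow
    have hlen : ((List.range (xs.length + 1)).map (fun k => (pvCombos k xs).map List.prod)).length = xs.length + 1 := by simp
    rw [hlen]
    have hrhs : List.range (xs.length + 1 + 1) = 0 :: List.range' 1 (xs.length + 1) := by
      rw [List.range_eq_range', List.range'_succ]
    rw [List.length_cons, hrhs, List.map_cons]
    have h0 : (pvCombos 0 (x :: xs)).map List.prod = [1] := by simp [pvCombos]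
    rw [h0]
    simp only [List.singleton_append, List.cons.injEq, true_and]
    apply List.map_congr_left
    intro k hk
    have hk' : 1 ≤ k ∧ k < xs.length + 2 := by
      rcases List.mem_range'.1 hk with ⟨i, hi, rfl⟩; omega
    obtain ⟨k', rfl⟩ : ∃ k', k = k' + 1 := ⟨k - 1, by omega⟩
    have hg1 : ((List.range (xs.length + 1)).map (fun k => (pvCombos k xs).map List.prod)).getD (k' + 1 - 1) [] = (pvCombos k' xs).map List.prod := by
      exact getD_map_range _ _ _ _ (by omega)
    rw [hg1]
    have hcons : (pvCombos (k' + 1) (x :: xs)).map List.prod =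
        ((pvCombos k' xs).map List.prod).map (fun p => x * p) ++ (pvCombos (k' + 1) xs).map List.prod := by
      simp [pvCombos, List.map_map, Function.comp_def]
    rw [hcons]
    congr 1
    by_cases h : k' + 1 < xs.length + 1
    · rw [if_pos h, getD_map_range _ _ _ _ h]
    · rw [if_neg h, pvCombos_nil_of_lt xs (k' + 1) (by omega)]
      simp

lemma buckets_eq (factors : List Int) :
    factors.reverse.foldl (fun bk x => pvGrow x bk) [[1]] =
      (List.range (factors.length + 1)).map (fun k => (pvCombos k factors).map List.prod) := by
  rw [List.foldl_reverse]
  exact foldr_pvGrow factors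

-- ===== VERDICT (by name: the statement is the Claim_ definition above) =====
theorem get_factor_multiplies_py_spec : Claim_equal_get_factor_multiplies_py := by
  intro factors _
  unfold Spec_get_factor_multiplies_py
  show get_factor_multiplies_py factors = get_factor_multiplies_py_alt factors
  unfold get_factor_multiplies_py get_factor_multiplies_py_alt
  simp only [buckets_eq, List.length_map, List.length_range, Nat.add_sub_cancel,
    foldl_append_singleton, foldl_append_acc, List.nil_append]
  rw [List.flatMap_def, List.flatMap_def]
  apply congrArg List.flatten
  apply List.map_congr_left
  intro i hi
  have hi' : 1 ≤ i ∧ i < factors.length + 1 := by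
    rcases List.mem_range'.1 hi with ⟨j, hj, rfl⟩; omega
  rw [getD_map_range _ _ _ _ hi'.2, List.map_map]
  apply List.map_congr_left
  intro c hc
  simp [foldl_mul_eq_prod, pvCombos_mem_length factors i c hc]
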